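-- pv_equiv track=rewrite | github.com/Ajit-53/Google-foobar2k20 | solutions_in_python/solution_4_1_bunny.py | solution
-- ===== SOURCE A (Python) =====
-- from itertools import combinations
--
-- def solution(num_buns, num_required):
--     buns = [[] for i in range(num_buns)]
--     if num_required == 0:
--         return buns
--     start = 0
--     for c in combinations(buns, num_buns - num_required + 1):
--         for item in c:
--             item.append(start)
--         start += 1
--     return buns
-- ===== SOURCE B (Python) =====
-- from itertools import combinations
--
-- def solution(num_buns, num_required):
--     n = max(num_buns, 0)
--     if num_required == 0:
--         return [[] for _ in range(n)]
--     combos = list(combinations(range(n), num_buns - num_required + 1))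
--     return [[key for key, combo in enumerate(combos) if i in combo]
--             for i in range(n)]
-- ===== Notes on version B (the rewrite author's own statement) =====
-- stated objective: alternative
-- what changed: B inverts the loop nesting: it materialises the list of index combinations once and builds each bunny's key list by a membership scan over all combinations, instead of A's single pass that mutates the shared empty sublists combination by combination.
import Mathlib
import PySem

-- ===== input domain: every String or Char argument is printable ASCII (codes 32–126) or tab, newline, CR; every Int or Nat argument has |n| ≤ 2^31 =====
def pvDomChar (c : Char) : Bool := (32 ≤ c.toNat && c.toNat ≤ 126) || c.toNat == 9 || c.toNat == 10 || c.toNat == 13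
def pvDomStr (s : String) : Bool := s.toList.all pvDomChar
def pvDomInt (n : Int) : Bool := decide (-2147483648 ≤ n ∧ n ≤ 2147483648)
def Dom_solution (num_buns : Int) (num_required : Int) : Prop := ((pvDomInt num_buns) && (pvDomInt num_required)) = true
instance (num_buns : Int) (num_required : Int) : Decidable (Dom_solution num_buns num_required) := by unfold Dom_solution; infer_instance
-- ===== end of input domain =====

-- B inverts the loop nesting: it materialises the index combinations and builds each
-- bunny's key list by scanning them, instead of A's single mutate-on-the-fly pass
-- over shared sublists (objective: alternative decomposition, same asymptotic cost).


-- itertools.combinations(l, k) in its enumeration (lexicographic-by-position) order;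
-- exact for k ≥ 0 (Pre_ excludes the ValueError case k < 0, where both Pythons raise)
def pvCombs {α : Type} : List α → Nat → List (List α)
  | _, 0 => [[]]
  | [], _ + 1 => []
  | x :: xs, k + 1 =>
    -- itertools yields no tuples at all when r > len(pool); the cutoff changes no value
    -- (every branch below it would be empty) but matches that early exit's cost
    if xs.length < k then []
    else ((pvCombs xs k).map (x :: ·)) ++ pvCombs xs (k + 1)

-- ===== PORT A =====
-- `combinations(buns, r)` picks sublists by POSITION and mutation is by object identity,
-- so it is ported as combinations of the index range, appending `start` at those indices.
def solution (num_buns : Int) (num_required : Int) : List (List Int) :=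
  let buns : List (List Int) := List.replicate num_buns.toNat []
  if num_required = 0 then buns
  else
    ((pvCombs (List.range num_buns.toNat) (num_buns - num_required + 1).toNat).foldl
      (fun (p : List (List Int) × Int) c =>
        (c.foldl (fun bs i => bs.modify i (· ++ [p.2])) p.1, p.2 + 1))
      (buns, 0)).1

-- ===== PORT B =====
def solution_alt (num_buns : Int) (num_required : Int) : List (List Int) :=
  let n := num_buns.toNat   -- n = max(num_buns, 0)
  if num_required = 0 then List.replicate n []
  else
    let combos := pvCombs (List.range n) (num_buns - num_required + 1).toNat
    (List.range n).map (fun i =>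
      (PySem.List.enumerate combos 0).filterMap
        (fun p => if i ∈ p.2 then some p.1 else none))

-- ===== PRECONDITION & SPEC =====
-- Pre_ excludes num_required ≠ 0 with num_required > num_buns + 1, where combinations()
-- gets a negative r and BOTH Pythons raise ValueError.
def Pre_solution (num_buns : Int) (num_required : Int) : Prop :=
  num_required = 0 ∨ 0 ≤ num_buns - num_required + 1
instance (num_buns : Int) (num_required : Int) : Decidable (Pre_solution num_buns num_required) := by unfold Pre_solution; infer_instance

def pvWitness_solution : Int × Int := (4, 2)

def Spec_solution (num_buns : Int) (num_required : Int) (out : List (List Int)) : Prop := out = solution_alt num_buns num_required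
instance (num_buns : Int) (num_required : Int) (out : List (List Int)) : Decidable (Spec_solution num_buns num_required out) := by unfold Spec_solution; infer_instance

-- ===== CLAIM (what is proved, stated in full; the proofs are below) =====
def Claim_equal_solution : Prop := ∀ (num_buns : Int) (num_required : Int), Dom_solution num_buns num_required → Pre_solution num_buns num_required → Spec_solution num_buns num_required (solution num_buns num_required)

-- ===== LEMMAS AND PROOFS =====

lemma pvCombs_sublist {α : Type} (l : List α) (k : Nat) :
    ∀ c ∈ pvCombs l k, c.Sublist l := by
  induction l generalizing k with
  | nil =>
      cases k with
      | zero => intro c hc; simp [pvCombs] at hc; simp [hc]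
      | succ k => intro c hc; simp [pvCombs] at hc
  | cons x xs ih =>
      cases k with
      | zero => intro c hc; simp [pvCombs] at hc; simp [hc]
      | succ k =>
          intro c hc
          simp only [pvCombs] at hc
          split at hc
          · simp at hc
          simp only [List.mem_append, List.mem_map] at hc
          rcases hc with ⟨d, hd, rfl⟩ | hc
          · exact (ih k d hd).cons₂ x
          · exact (ih (k + 1) c hc).cons x

-- one inner loop of A: appending `s` at each index of `c` leaves lengths unchanged
lemma appendAt_length (c : List Nat) (bs : List (List Int)) (s : Int) :
    (c.foldl (fun bs i => bs.modify i (· ++ [s])) bs).length = bs.length := by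
  induction c generalizing bs with
  | nil => rfl
  | cons j c ih => simp [List.foldl_cons, ih, List.length_modify]

lemma appendAt_getElem (c : List Nat) (bs : List (List Int)) (s : Int)
    (hnd : c.Nodup) (i : Nat) (hi : i < bs.length)
    (hlen : (c.foldl (fun bs i => bs.modify i (· ++ [s])) bs).length = bs.length) :
    (c.foldl (fun bs i => bs.modify i (· ++ [s])) bs)[i]'(hlen ▸ hi) =
      bs[i] ++ (if i ∈ c then [s] else []) := by
  induction c generalizing bs with
  | nil => simp
  | cons j c ih =>
      simp only [List.foldl_cons]
      have hnd' := (List.nodup_cons.mp hnd).2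
      have hj : j ∉ c := (List.nodup_cons.mp hnd).1
      have hi' : i < (bs.modify j (· ++ [s])).length := by
        rw [List.length_modify]; exact hi
      rw [ih (bs.modify j (· ++ [s])) hnd' hi'
          (by rw [appendAt_length, List.length_modify])]
      rw [List.getElem_modify]
      by_cases hij : j = i
      · subst hij
        simp [hj]
      · simp only [if_neg hij, List.mem_cons]
        have : ¬ i = j := fun h => hij h.symm
        simp [this]

-- A's outer fold, read off at one index, yields exactly B's comprehension for that index
lemma foldA_length (cs : List (List Nat)) (bs : List (List Int)) (s : Int) :
    ((cs.foldl (fun (p : List (List Int) × Int) c =>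
        (c.foldl (fun bs i => bs.modify i (· ++ [p.2])) p.1, p.2 + 1)) (bs, s)).1).length
      = bs.length := by
  induction cs generalizing bs s with
  | nil => rfl
  | cons c cs ih => simp only [List.foldl_cons]; rw [ih, appendAt_length]

lemma foldA_getElem (cs : List (List Nat)) (bs : List (List Int)) (s : Int)
    (hnd : ∀ c ∈ cs, c.Nodup) (i : Nat) (hi : i < bs.length)
    (hlen : ((cs.foldl (fun (p : List (List Int) × Int) c =>
        (c.foldl (fun bs i => bs.modify i (· ++ [p.2])) p.1, p.2 + 1)) (bs, s)).1).length
        = bs.length) :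
    ((cs.foldl (fun (p : List (List Int) × Int) c =>
        (c.foldl (fun bs i => bs.modify i (· ++ [p.2])) p.1, p.2 + 1)) (bs, s)).1)[i]'(hlen ▸ hi)
      = bs[i] ++ (PySem.List.enumerate cs s).filterMap
          (fun p => if i ∈ p.2 then some p.1 else none) := by
  induction cs generalizing bs s with
  | nil => simp [PySem.List.enumerate_nil]
  | cons c cs ih =>
      simp only [List.foldl_cons]
      have hi' : i < (c.foldl (fun bs j => bs.modify j (· ++ [s])) bs).length := by
        rw [appendAt_length]; exact hi
      rw [ih (c.foldl (fun bs j => bs.modify j (· ++ [s])) bs) (s + 1)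
            (fun d hd => hnd d (List.mem_cons_of_mem _ hd)) hi'
            (by rw [foldA_length, appendAt_length])]
      rw [appendAt_getElem c bs s (hnd c List.mem_cons_self) i hi (appendAt_length c bs s)]
      rw [PySem.List.enumerate_cons, List.filterMap_cons]
      by_cases hm : i ∈ c
      · simp [hm, List.append_assoc]
      · simp [hm]

-- ===== VERDICT (by name: the statement is the Claim_ definition above) =====
theorem solution_spec : Claim_equal_solution := by
  intro num_buns num_required _ _
  unfold Spec_solution solution solution_alt
  by_cases h0 : num_required = 0
  · simp [h0]
  · simp only [if_neg h0]
    set n := num_buns.toNat with hn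
    set k := (num_buns - num_required + 1).toNat with hk
    set cs := pvCombs (List.range n) k with hcs
    have hnd : ∀ c ∈ cs, c.Nodup :=
      fun c hc => (pvCombs_sublist (List.range n) k c hc).nodup (List.nodup_range)
    have hbl : (List.replicate n ([] : List Int)).length = n := List.length_replicate
    apply List.ext_getElem
    · rw [foldA_length]; simp
    · intro i h1 h2
      have hi : i < n := by simpa using h2
      have hi' : i < (List.replicate n ([] : List Int)).length := by rw [hbl]; exact hi
      rw [foldA_getElem cs (List.replicate n []) 0 hnd i hi'
            (by rw [foldA_length])]
      simp
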